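-- pv_equiv track=rewrite | github.com/YunTianZhou/LeetcodeContest | Weekly Contest/Weekly Contest 454/3584. Maximum Product of First and Last Elements of a Subsequence.py | maximumProduct
-- ===== SOURCE A (Python) =====
-- from typing import List
-- from math import inf
--
-- def maximumProduct(nums: List[int], m: int) -> int:
--     n = len(nums)
--
--     mini = nums[0]
--     maxi = nums[0]
--     res = -inf
--     for i in range(m - 1, n):
--         maxi = max(maxi, nums[i - m + 1])
--         mini = min(mini, nums[i - m + 1])
--         res = max(res, maxi * nums[i], mini * nums[i])
--
--     return res
-- ===== SOURCE B (Python) =====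
-- def maximumProduct(nums, m):
--     n = len(nums)
--     smax = nums[:]
--     smin = nums[:]
--     for i in range(n - 2, -1, -1):
--         smax[i] = max(nums[i], smax[i + 1])
--         smin[i] = min(nums[i], smin[i + 1])
--     return max(max(nums[k] * smax[k + m - 1], nums[k] * smin[k + m - 1])
--                for k in range(n - m + 1))
-- ===== Notes on version B (the rewrite author's own statement) =====
-- stated objective: alternative
-- what changed: A makes one forward scan over last positions i, threading running prefix max/min through O(1) mutable state; B instead materializes full suffix-max/suffix-min arrays with a separate backward pass and then maximizes nums[k]*smax[k+m-1] and nums[k]*smin[k+m-1] over first positions k - the transposed grouping of the candidate pairs (fixed first element against suffix extrema, instead of fixed last element against prefix extrema).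
-- outside the precondition, e.g. on maximumProduct([1, 2], 3): A returns -inf, B raises ValueError; on maximumProduct([1, 2], 0): A raises IndexError, B raises IndexError
import Mathlib
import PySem

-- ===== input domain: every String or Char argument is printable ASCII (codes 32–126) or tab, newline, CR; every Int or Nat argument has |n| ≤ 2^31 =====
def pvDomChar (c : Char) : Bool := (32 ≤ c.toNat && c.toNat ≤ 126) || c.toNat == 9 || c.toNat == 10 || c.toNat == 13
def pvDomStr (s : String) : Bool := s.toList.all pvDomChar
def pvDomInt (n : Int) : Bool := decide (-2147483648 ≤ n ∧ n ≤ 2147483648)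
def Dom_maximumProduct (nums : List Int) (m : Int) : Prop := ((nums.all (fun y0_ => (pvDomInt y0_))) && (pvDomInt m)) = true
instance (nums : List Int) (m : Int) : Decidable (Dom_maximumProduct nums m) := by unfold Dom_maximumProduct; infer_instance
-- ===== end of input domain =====

-- B replaces A's forward scan (running prefix max/min paired with each last position) by a
-- backward pass materializing suffix max/min arrays, then a scan over FIRST positions k pairing
-- nums[k] with the suffix extrema at k+m-1 (objective: alternative, transposed pair grouping).

-- ===== PORT A =====
-- A's loop body; res = -inf is modeled as `none` (under Pre_ the loop runs at least once,
-- so the final res is an int). Index reads use pyGetD 0: under Pre_ every index is in range.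
def pvStepA (nums : List Int) (m : Int) (st : Int × Int × Option Int) (i : Int) :
    Int × Int × Option Int :=
  let maxi := max st.1 (PySem.List.pyGetD nums (i - m + 1) 0)
  let mini := min st.2.1 (PySem.List.pyGetD nums (i - m + 1) 0)
  let x := PySem.List.pyGetD nums i 0
  let res : Option Int :=
    match st.2.2 with
    | none => some (max (maxi * x) (mini * x))
    | some r => some (max (max r (maxi * x)) (mini * x))
  (maxi, mini, res)

def maximumProduct (nums : List Int) (m : Int) : Int :=
  let n : Int := nums.length
  -- nums[0] raises IndexError on []; excluded by Pre_, headD 0 is unreachable default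
  let st := (PySem.List.pyRange (m - 1) n 1).foldl (pvStepA nums m) (nums.headD 0, nums.headD 0, none)
  st.2.2.getD 0   -- under Pre_ the loop ran, so this is the int res; -inf case excluded by Pre_

-- ===== PORT B =====
def maximumProduct_alt (nums : List Int) (m : Int) : Int :=
  let n : Int := nums.length
  let smax0 := PySem.List.slice nums none none   -- nums[:]
  let smin0 := PySem.List.slice nums none none   -- nums[:]
  -- backward pass: smax[i] = max(nums[i], smax[i+1]); smin[i] = min(nums[i], smin[i+1])
  let p := (PySem.List.pyRange (n - 2) (-1) (-1)).foldl
    (fun (st : List Int × List Int) i =>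
      (PySem.List.pySetD st.1 i (max (PySem.List.pyGetD nums i 0) (PySem.List.pyGetD st.1 (i + 1) 0)),
       PySem.List.pySetD st.2 i (min (PySem.List.pyGetD nums i 0) (PySem.List.pyGetD st.2 (i + 1) 0))))
    (smax0, smin0)
  -- the generator under max(): one candidate per first position k
  let cands := (PySem.List.pyRange 0 (n - m + 1) 1).map (fun k =>
    max (PySem.List.pyGetD nums k 0 * PySem.List.pyGetD p.1 (k + m - 1) 0)
        (PySem.List.pyGetD nums k 0 * PySem.List.pyGetD p.2 (k + m - 1) 0))
  match cands with
  | [] => 0              -- Python max() raises ValueError here; excluded by Pre_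
  | c :: cs => cs.foldl max c

-- ===== PRECONDITION & SPEC =====
-- Pre_ excludes: nums = [] (A raises IndexError at nums[0]); m ≤ 0 (A raises IndexError
-- reading nums[i-m+1] past the end); m > len(nums) (A returns -inf, a float outside the
-- declared int return type, while B's max() over an empty generator raises ValueError).
def Pre_maximumProduct (nums : List Int) (m : Int) : Prop :=
  nums ≠ [] ∧ 1 ≤ m ∧ m ≤ (nums.length : Int)
instance (nums : List Int) (m : Int) : Decidable (Pre_maximumProduct nums m) := by
  unfold Pre_maximumProduct; infer_instance

def pvWitness_maximumProduct : List Int × Int := ([1, 2], 1)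

def Spec_maximumProduct (nums : List Int) (m : Int) (out : Int) : Prop := out = maximumProduct_alt nums m
instance (nums : List Int) (m : Int) (out : Int) : Decidable (Spec_maximumProduct nums m out) := by unfold Spec_maximumProduct; infer_instance

-- ===== CLAIM (what is proved, stated in full; the proofs are below) =====
def Claim_equal_maximumProduct : Prop := ∀ (nums : List Int) (m : Int), Dom_maximumProduct nums m → Pre_maximumProduct nums m → Spec_maximumProduct nums m (maximumProduct nums m)

-- ===== LEMMAS AND PROOFS =====

def pvOptStep (r : Option Int) (c : Int) : Option Int :=
  match r with
  | none => some c
  | some r => some (max r c)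

theorem pvOptFold_some (cs : List Int) : ∀ (r : Int),
    cs.foldl pvOptStep (some r) = some (cs.foldl max r) := by
  induction cs with
  | nil => intro r; rfl
  | cons c cs ih => intro r; simp [pvOptStep, ih]

theorem pvOptFold_getD (cs : List Int) :
    (cs.foldl pvOptStep none).getD 0 = (match cs with | [] => 0 | c :: cs' => cs'.foldl max c) := by
  cases cs with
  | nil => rfl
  | cons c cs => simp [pvOptStep, pvOptFold_some]

theorem pvFoldMaxHoist (cs : List Int) : ∀ (u c : Int),
    cs.foldl max (max u c) = max u (cs.foldl max c) := by
  induction cs with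
  | nil => intro u c; rfl
  | cons d cs ih => intro u c; simp only [List.foldl_cons, max_assoc, ih]

theorem pvOptFold_cons (r : Option Int) (c : Int) (cs : List Int) :
    (c :: cs).foldl pvOptStep r = pvOptStep r (cs.foldl max c) := by
  cases r with
  | none => simp [pvOptStep, pvOptFold_some]
  | some u => simp [pvOptStep, pvOptFold_some, pvFoldMaxHoist]

theorem pvFoldl_flatMap (l : List Int) (f : Int → List Int) : ∀ (r : Option Int),
    (l.flatMap f).foldl pvOptStep r = l.foldl (fun r i => (f i).foldl pvOptStep r) r := by
  induction l with
  | nil => intro r; rfl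
  | cons a l ih => intro r; simp only [List.flatMap_cons, List.foldl_append, List.foldl_cons, ih]

-- key pointwise fact: inserting v into a prefix with extrema a ≥ b keeps the two-extrema form
theorem pvKey (a b v x : Int) (hba : b ≤ a) :
    max (max (a*x) (b*x)) (v*x) = max ((max a v)*x) ((min b v)*x) := by
  rcases le_total 0 x with hx|hx <;> rcases le_total a v with h|h <;>
    rcases le_total b v with h3|h3
  · rw [max_eq_right h, min_eq_left h3]
    have h1 : b*x ≤ a*x := mul_le_mul_of_nonneg_right hba hx
    have h2 : a*x ≤ v*x := mul_le_mul_of_nonneg_right h hx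
    omega
  · rw [max_eq_right h, min_eq_right h3]
    have h1 : b*x ≤ a*x := mul_le_mul_of_nonneg_right hba hx
    have h2 : a*x ≤ v*x := mul_le_mul_of_nonneg_right h hx
    have h4 : v*x ≤ b*x := mul_le_mul_of_nonneg_right h3 hx
    omega
  · rw [max_eq_left h, min_eq_left h3]
    have h1 : b*x ≤ a*x := mul_le_mul_of_nonneg_right hba hx
    have h2 : v*x ≤ a*x := mul_le_mul_of_nonneg_right h hx
    omega
  · rw [max_eq_left h, min_eq_right h3]
    have h1 : b*x ≤ a*x := mul_le_mul_of_nonneg_right hba hx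
    have h4 : v*x ≤ b*x := mul_le_mul_of_nonneg_right h3 hx
    omega
  · rw [max_eq_right h, min_eq_left h3]
    have h1 : a*x ≤ b*x := mul_le_mul_of_nonpos_right hba hx
    have h2 : v*x ≤ a*x := mul_le_mul_of_nonpos_right h hx
    omega
  · rw [max_eq_right h, min_eq_right h3]
    have h1 : a*x ≤ b*x := mul_le_mul_of_nonpos_right hba hx
    have h2 : v*x ≤ a*x := mul_le_mul_of_nonpos_right h hx
    have h4 : b*x ≤ v*x := mul_le_mul_of_nonpos_right h3 hx
    omega
  · rw [max_eq_left h, min_eq_left h3]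
    have h1 : a*x ≤ b*x := mul_le_mul_of_nonpos_right hba hx
    have h4 : v*x ≤ b*x := mul_le_mul_of_nonpos_right h3 hx
    omega
  · rw [max_eq_left h, min_eq_right h3]
    have h1 : a*x ≤ b*x := mul_le_mul_of_nonpos_right hba hx
    have h4 : b*x ≤ v*x := mul_le_mul_of_nonpos_right h3 hx
    omega

-- B's per-i chunk, folded with max, is the two-extrema candidate of the prefix
theorem pvChunk (x : Int) : ∀ (l : List Int) (a b : Int), b ≤ a →
    (l.map (fun v => v * x)).foldl max (max (a*x) (b*x))
      = max ((l.foldl max a) * x) ((l.foldl min b) * x) := by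
  intro l
  induction l with
  | nil => intro a b _; rfl
  | cons v l ih =>
      intro a b hba
      simp only [List.map_cons, List.foldl_cons, pvKey a b v x hba]
      exact ih (max a v) (min b v) (le_trans (min_le_left _ _) (le_trans hba (le_max_left _ _)))

-- [nums[k] for k in range(l)] = nums.take l
theorem pvTakeMap (nums : List Int) (l : Nat) (hl : l ≤ nums.length) :
    (PySem.List.pyRange 0 (l : Int) 1).map (fun k => PySem.List.pyGetD nums k 0) = nums.take l := by
  have h := PySem.List.map_pyGetD_pyRange_zero (nums.take l) (0 : Int)
  rw [PySem.List.len_eq, List.length_take, Nat.min_eq_left hl] at h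
  rw [← h]
  apply List.map_congr_left
  intro k hk
  have hk' := (PySem.List.mem_pyRange_one).1 hk
  have hkl : k.toNat < l := by omega
  rw [show k = ((k.toNat : Nat) : Int) from (Int.toNat_of_nonneg hk'.1).symm,
    PySem.List.pyGetD_natCast, PySem.List.pyGetD_natCast,
    List.getD_eq_getElem _ _ (by omega : k.toNat < nums.length),
    List.getD_eq_getElem _ _ (by rw [List.length_take]; omega),
    List.getElem_take]

-- prefix-extrema step: extending the prefix by one element
theorem pvMstep (nums : List Int) (j : Nat) (hj : j < nums.length) (a : Int) :
    (nums.take (j+1)).foldl max a = max ((nums.take j).foldl max a) nums[j] := by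
  rw [List.take_add_one, List.getElem?_eq_getElem hj]
  simp only [Option.toList_some, List.foldl_append, List.foldl_cons, List.foldl_nil]

theorem pvLstep (nums : List Int) (j : Nat) (hj : j < nums.length) (a : Int) :
    (nums.take (j+1)).foldl min a = min ((nums.take j).foldl min a) nums[j] := by
  rw [List.take_add_one, List.getElem?_eq_getElem hj]
  simp only [Option.toList_some, List.foldl_append, List.foldl_cons, List.foldl_nil]

-- the combined loop lemma: A's stateful scan and B's chunked fold agree step by step
theorem pvLoop (x0 : Int) (xs : List Int) (m : Int) (hm : 1 ≤ m) :
    ∀ (c j : Nat), (x0 :: xs).length ≤ (m - 1).toNat + j + c →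
    ∀ (r : Option Int),
    ((PySem.List.pyRange (m - 1 + (j : Int)) (((x0 :: xs).length : Nat) : Int) 1).foldl
        (pvStepA (x0 :: xs) m)
        (((x0 :: xs).take j).foldl max x0, ((x0 :: xs).take j).foldl min x0, r)).2.2
    = (PySem.List.pyRange (m - 1 + (j : Int)) (((x0 :: xs).length : Nat) : Int) 1).foldl
        (fun r i => ((PySem.List.pyRange 0 (i - m + 2) 1).map (fun k =>
            PySem.List.pyGetD (x0 :: xs) k 0 * PySem.List.pyGetD (x0 :: xs) i 0)).foldl
          pvOptStep r) r := by
  intro c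
  induction c with
  | zero =>
      intro j hc r
      have h1 : (((x0 :: xs).length : Nat) : Int) ≤ m - 1 + (j : Int) := by
        have := Int.toNat_of_nonneg (show (0:Int) ≤ m - 1 by omega)
        omega
      rw [PySem.List.pyRange_one_eq_nil h1]
      rfl
  | succ c ih =>
      intro j hc r
      set nums := x0 :: xs with hnums
      by_cases hlt : (m - 1 + (j : Int)) < ((nums.length : Nat) : Int)
      · have hj : j < nums.length := by
          have := Int.toNat_of_nonneg (show (0:Int) ≤ m - 1 by omega)
          omega
        rw [PySem.List.pyRange_one_cons hlt, List.foldl_cons, List.foldl_cons]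
        -- A's step
        have e1 : (m - 1 + (j : Int)) - m + 1 = (j : Int) := by ring
        have e2 : PySem.List.pyGetD nums ((m - 1 + (j : Int)) - m + 1) 0 = nums[j] := by
          rw [e1, PySem.List.pyGetD_natCast]; exact List.getD_eq_getElem _ _ hj
        have hstep : pvStepA nums m
            ((nums.take j).foldl max x0, (nums.take j).foldl min x0, r) (m - 1 + (j : Int)) =
            ((nums.take (j+1)).foldl max x0, (nums.take (j+1)).foldl min x0,
              pvOptStep r (max ((nums.take (j+1)).foldl max x0 * PySem.List.pyGetD nums (m - 1 + (j : Int)) 0)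
                              ((nums.take (j+1)).foldl min x0 * PySem.List.pyGetD nums (m - 1 + (j : Int)) 0))) := by
          cases r with
          | none => simp [pvStepA, e2, pvOptStep, pvMstep nums j hj, pvLstep nums j hj]
          | some v => simp [pvStepA, e2, pvOptStep, pvMstep nums j hj, pvLstep nums j hj, max_assoc]
        rw [hstep]
        -- B's chunk
        have e3 : (m - 1 + (j : Int)) - m + 2 = ((j + 1 : Nat) : Int) := by push_cast; ring
        have hchunk :
            ((PySem.List.pyRange 0 ((m - 1 + (j : Int)) - m + 2) 1).map (fun k =>
                PySem.List.pyGetD nums k 0 * PySem.List.pyGetD nums (m - 1 + (j : Int)) 0)).foldl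
              pvOptStep r
            = pvOptStep r (max ((nums.take (j+1)).foldl max x0 * PySem.List.pyGetD nums (m - 1 + (j : Int)) 0)
                              ((nums.take (j+1)).foldl min x0 * PySem.List.pyGetD nums (m - 1 + (j : Int)) 0)) := by
          set t := PySem.List.pyGetD nums (m - 1 + (j : Int)) 0 with ht
          have hmm : ((PySem.List.pyRange 0 ((m - 1 + (j : Int)) - m + 2) 1).map (fun k =>
              PySem.List.pyGetD nums k 0 * t))
              = ((PySem.List.pyRange 0 (((j + 1 : Nat) : Nat) : Int) 1).map
                  (fun k => PySem.List.pyGetD nums k 0)).map (fun v => v * t) := by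
            rw [e3, List.map_map]; rfl
          rw [hmm, pvTakeMap nums (j+1) (by omega)]
          have htake : nums.take (j+1) = x0 :: xs.take j := by rw [hnums, List.take_succ_cons]
          rw [htake, List.map_cons, pvOptFold_cons]
          have hx0 : ((xs.take j).map (fun v => v * t)).foldl max (x0 * t)
              = max (((xs.take j).foldl max x0) * t) (((xs.take j).foldl min x0) * t) := by
            rw [show x0 * t = max (x0 * t) (x0 * t) from (max_self _).symm,
              pvChunk t (xs.take j) x0 x0 le_rfl]
          rw [hx0]
          simp [List.foldl_cons, max_self, min_self]
        rw [hchunk]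
        have harr : m - 1 + (j : Int) + 1 = m - 1 + ((j + 1 : Nat) : Int) := by push_cast; ring
        rw [harr]
        exact ih (j + 1) (by omega) _
      · have h1 : ((nums.length : Nat) : Int) ≤ m - 1 + (j : Int) := by omega
        rw [PySem.List.pyRange_one_eq_nil h1]
        rfl

-- ----- B-side lemmas: the backward pass builds the suffix-extrema array -----

-- the suffix-extrema array (spec object): entry j is the fold of f over the suffix from j
def pvSufArr (f : Int → Int → Int) : List Int → List Int
  | [] => []
  | x :: rest => rest.foldl f x :: pvSufArr f rest

theorem pvSufArr_length (f : Int → Int → Int) :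
    ∀ (l : List Int), (pvSufArr f l).length = l.length := by
  intro l
  induction l with
  | nil => rfl
  | cons x rest ih => simp [pvSufArr, ih]

theorem pvSufArr_getD (f : Int → Int → Int) :
    ∀ (l : List Int) (j : Nat), j < l.length →
      (pvSufArr f l).getD j 0 = (l.drop (j+1)).foldl f (l.getD j 0) := by
  intro l
  induction l with
  | nil => intro j hj; simp at hj
  | cons x rest ih =>
      intro j hj
      cases j with
      | zero => simp [pvSufArr]
      | succ j => simpa [pvSufArr] using ih j (by simpa using hj)

theorem pvFoldHoist (f : Int → Int → Int) (hf : ∀ a b c, f (f a b) c = f a (f b c)) :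
    ∀ (l : List Int) (u c : Int), l.foldl f (f u c) = f u (l.foldl f c) := by
  intro l
  induction l with
  | nil => intro u c; rfl
  | cons d l ih => intro u c; simp only [List.foldl_cons, hf, ih]

theorem pvSufRecur (f : Int → Int → Int) (hf : ∀ a b c, f (f a b) c = f a (f b c))
    (l : List Int) (j : Nat) (hj : j + 1 < l.length) :
    (pvSufArr f l).getD j 0 = f (l.getD j 0) ((pvSufArr f l).getD (j+1) 0) := by
  rw [pvSufArr_getD f l j (by omega), pvSufArr_getD f l (j+1) hj]
  rw [List.drop_eq_getElem_cons hj, List.foldl_cons, pvFoldHoist f hf]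
  rw [List.getD_eq_getElem _ _ hj]

-- one backward step of B's loop
def pvStepArr (nums : List Int) (f : Int → Int → Int) (st : List Int) (i : Int) : List Int :=
  PySem.List.pySetD st i (f (PySem.List.pyGetD nums i 0) (PySem.List.pyGetD st (i + 1) 0))

-- the paired fold of B's loop body splits into two independent array folds
theorem pvPairSplit (nums : List Int) :
    ∀ (l : List Int) (a b : List Int),
      l.foldl (fun (st : List Int × List Int) i =>
        (PySem.List.pySetD st.1 i (max (PySem.List.pyGetD nums i 0) (PySem.List.pyGetD st.1 (i + 1) 0)),
         PySem.List.pySetD st.2 i (min (PySem.List.pyGetD nums i 0) (PySem.List.pyGetD st.2 (i + 1) 0)))) (a, b)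
      = (l.foldl (pvStepArr nums max) a, l.foldl (pvStepArr nums min) b) := by
  intro l
  induction l with
  | nil => intro a b; rfl
  | cons i l ih =>
      intro a b
      simp only [List.foldl_cons]
      exact ih _ _

theorem pvSufStep (f : Int → Int → Int) (hf : ∀ a b c, f (f a b) c = f a (f b c))
    (nums : List Int) (t : Nat) (ht : t + 1 < nums.length) :
    pvStepArr nums f (nums.take (t+1) ++ (pvSufArr f nums).drop (t+1)) (t : Int)
      = nums.take t ++ (pvSufArr f nums).drop t := by
  have hlen : (pvSufArr f nums).length = nums.length := pvSufArr_length f nums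
  unfold pvStepArr
  have h1 : PySem.List.pyGetD nums (t : Int) 0 = nums.getD t 0 := PySem.List.pyGetD_natCast _ _ _
  have h2 : PySem.List.pyGetD (nums.take (t+1) ++ (pvSufArr f nums).drop (t+1)) ((t:Int) + 1) 0
      = (pvSufArr f nums).getD (t+1) 0 := by
    rw [show (t:Int) + 1 = ((t+1 : Nat) : Int) by push_cast; ring, PySem.List.pyGetD_natCast]
    rw [List.getD_append_right _ _ _ _ (by simp [List.length_take])]
    have he : t + 1 - (nums.take (t+1)).length = 0 := by simp [List.length_take]; omega
    rw [he]
    simp [List.getD_eq_getElem?_getD, List.getElem?_drop]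
  rw [h1, h2, PySem.List.pySetD_natCast]
  rw [List.set_eq_take_cons_drop _ (by simp [List.length_take, hlen]; omega)]
  have h3 : (nums.take (t+1) ++ (pvSufArr f nums).drop (t+1)).take t = nums.take t := by
    rw [List.take_append_of_le_length (by simp [List.length_take]; omega), List.take_take]
    congr 1; omega
  have h4 : (nums.take (t+1) ++ (pvSufArr f nums).drop (t+1)).drop (t+1)
      = (pvSufArr f nums).drop (t+1) := by
    exact List.drop_left' (by simp [List.length_take]; omega)
  rw [h3, h4, ← pvSufRecur f hf nums t ht]
  have h5 : (pvSufArr f nums).getD t 0 :: (pvSufArr f nums).drop (t+1)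
      = (pvSufArr f nums).drop t := by
    rw [List.getD_eq_getElem _ _ (by omega : t < (pvSufArr f nums).length)]
    exact (List.drop_eq_getElem_cons (by omega)).symm
  rw [← h5]

theorem pvSufLoopArr (f : Int → Int → Int) (hf : ∀ a b c, f (f a b) c = f a (f b c))
    (nums : List Int) :
    ∀ (t : Nat), t + 1 < nums.length →
      (PySem.List.pyRange (t : Int) (-1) (-1)).foldl (pvStepArr nums f)
        (nums.take (t+1) ++ (pvSufArr f nums).drop (t+1)) = pvSufArr f nums := by
  intro t
  induction t with
  | zero =>
      intro ht
      rw [PySem.List.pyRange_neg_one_cons (by omega : (-1 : Int) < ((0 : Nat) : Int))]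
      simp only [List.foldl_cons]
      rw [pvSufStep f hf nums 0 ht]
      rw [show ((0 : Nat) : Int) - 1 = (-1 : Int) by norm_num,
        PySem.List.pyRange_neg_one_eq_nil le_rfl]
      simp
  | succ t ih =>
      intro ht
      rw [PySem.List.pyRange_neg_one_cons (by omega : (-1 : Int) < ((t + 1 : Nat) : Int))]
      simp only [List.foldl_cons]
      rw [pvSufStep f hf nums (t+1) ht]
      rw [show ((t + 1 : Nat) : Int) - 1 = ((t : Nat) : Int) by push_cast; ring]
      exact ih (by omega)

-- the full backward loop, from the initial copies of nums
theorem pvSufLoopFull (f : Int → Int → Int) (hf : ∀ a b c, f (f a b) c = f a (f b c))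
    (nums : List Int) (hne : nums ≠ []) :
    (PySem.List.pyRange ((nums.length : Int) - 2) (-1) (-1)).foldl (pvStepArr nums f) nums
      = pvSufArr f nums := by
  have hlen : (pvSufArr f nums).length = nums.length := pvSufArr_length f nums
  rcases Nat.lt_or_ge nums.length 2 with h2 | h2
  · -- length 1: the loop range is empty and the array equals nums
    obtain ⟨x, xs, rfl⟩ := List.exists_cons_of_ne_nil hne
    have hx : xs = [] := by
      cases xs with
      | nil => rfl
      | cons y ys => simp at h2
    subst hx
    rw [show ((([x] : List Int).length : Int) - 2) = (-1 : Int) by simp,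
      PySem.List.pyRange_neg_one_eq_nil (by norm_num)]
    rfl
  · have hdrop : (pvSufArr f nums).drop (nums.length - 1) = nums.drop (nums.length - 1) := by
      apply List.ext_getElem (by simp [hlen])
      intro i hi1 hi2
      simp only [List.getElem_drop]
      have hi : i = 0 := by simp [hlen] at hi1; omega
      subst hi
      have hj : nums.length - 1 + 0 < nums.length := by omega
      have hchar := pvSufArr_getD f nums (nums.length - 1 + 0) hj
      rw [List.getD_eq_getElem _ _ (by omega), List.getD_eq_getElem _ _ hj] at hchar
      rw [hchar]
      have hnil : nums.drop (nums.length - 1 + 0 + 1) = [] := by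
        apply List.drop_eq_nil_of_le; omega
      rw [hnil, List.foldl_nil]
    have hinit : nums.take (nums.length - 1) ++ (pvSufArr f nums).drop (nums.length - 1) = nums := by
      rw [hdrop, List.take_append_drop]
    have hcast : (nums.length : Int) - 2 = ((nums.length - 2 : Nat) : Int) := by omega
    have hloop := pvSufLoopArr f hf nums (nums.length - 2) (by omega)
    rw [show nums.length - 2 + 1 = nums.length - 1 by omega, hinit] at hloop
    rw [hcast]
    exact hloop

-- ----- option-max folds are determined by membership -----

theorem pvOptFold_eq_max? (l : List Int) : l.foldl pvOptStep none = l.max? := by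
  cases l with
  | nil => rfl
  | cons c cs => rw [pvOptFold_cons]; rfl

theorem pvOptFold_eq_of_mem (l1 l2 : List Int) (h : ∀ x, x ∈ l1 ↔ x ∈ l2) :
    l1.foldl pvOptStep none = l2.foldl pvOptStep none := by
  rw [pvOptFold_eq_max?, pvOptFold_eq_max?]
  cases h1 : l1.max? with
  | none =>
      rw [List.max?_eq_none_iff] at h1
      have h2 : l2 = [] := by
        rw [List.eq_nil_iff_forall_not_mem]
        intro x hx
        rw [h1] at h
        exact (List.not_mem_nil).elim ((h x).mpr hx)
      rw [h2]; rfl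
  | some a =>
      obtain ⟨ha, hmax⟩ := List.max?_eq_some_iff.mp h1
      exact (List.max?_eq_some_iff.mpr ⟨(h a).mp ha, fun b hb => hmax b ((h b).mpr hb)⟩).symm

-- ----- the two pair groupings list the same products -----

theorem pvMemTranspose (nums : List Int) (m : Int) (x : Int) :
    (x ∈ (PySem.List.pyRange (m - 1) ((nums.length : Nat) : Int) 1).flatMap (fun i =>
        (PySem.List.pyRange 0 (i - m + 2) 1).map (fun k =>
          PySem.List.pyGetD nums k 0 * PySem.List.pyGetD nums i 0)))
    ↔ (x ∈ (PySem.List.pyRange 0 ((nums.length : Int) - m + 1) 1).flatMap (fun k =>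
        (PySem.List.pyRange (k + m - 1) ((nums.length : Nat) : Int) 1).map (fun i =>
          PySem.List.pyGetD nums k 0 * PySem.List.pyGetD nums i 0))) := by
  simp only [List.mem_flatMap, List.mem_map, PySem.List.mem_pyRange_one]
  constructor
  · rintro ⟨i, ⟨hi1, hi2⟩, k, ⟨⟨hk1, hk2⟩, rfl⟩⟩
    exact ⟨k, ⟨by omega, by omega⟩, i, ⟨by omega, by omega⟩, rfl⟩
  · rintro ⟨k, ⟨hk1, hk2⟩, i, ⟨⟨hi1, hi2⟩, rfl⟩⟩
    exact ⟨i, ⟨by omega, by omega⟩, k, ⟨by omega, by omega⟩, rfl⟩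

-- per-k collapse: the k-th chunk's option-max fold equals B's per-k candidate
theorem pvChunkK (nums : List Int) (m : Int) (hm : 1 ≤ m) (k : Int)
    (hk0 : 0 ≤ k) (hk1 : k < (nums.length : Int) - m + 1) (r : Option Int) :
    ((PySem.List.pyRange (k + m - 1) ((nums.length : Nat) : Int) 1).map (fun i =>
        PySem.List.pyGetD nums k 0 * PySem.List.pyGetD nums i 0)).foldl pvOptStep r
    = pvOptStep r
        (max (PySem.List.pyGetD nums k 0 * PySem.List.pyGetD (pvSufArr max nums) (k + m - 1) 0)
             (PySem.List.pyGetD nums k 0 * PySem.List.pyGetD (pvSufArr min nums) (k + m - 1) 0)) := by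
  set c := PySem.List.pyGetD nums k 0 with hc
  obtain ⟨jn, hjj⟩ : ∃ jn : Nat, k + m - 1 = (jn : Int) := ⟨(k + m - 1).toNat, by omega⟩
  rw [hjj]
  have hjn : jn < nums.length := by omega
  have hmap : (PySem.List.pyRange ((jn : Nat) : Int) ((nums.length : Nat) : Int) 1).map (fun i =>
      c * PySem.List.pyGetD nums i 0)
      = (nums.drop (((jn : Nat) : Int)).toNat).map (fun v => c * v) := by
    rw [← PySem.List.map_pyGetD_pyRange' nums 0 (show (0:Int) ≤ ((jn : Nat) : Int) by omega),
      List.map_map]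
    rfl
  rw [Int.toNat_natCast] at hmap
  rw [hmap, List.drop_eq_getElem_cons hjn, List.map_cons, pvOptFold_cons]
  have hcomm : (fun v => c * v) = (fun v => v * c) := funext fun v => mul_comm c v
  rw [hcomm, mul_comm c (nums[jn]'hjn)]
  rw [show nums[jn]'hjn * c = max (nums[jn]'hjn * c) (nums[jn]'hjn * c) from (max_self _).symm]
  rw [pvChunk c (nums.drop (jn + 1)) _ _ le_rfl]
  have hmaxD : PySem.List.pyGetD (pvSufArr max nums) ((jn : Nat) : Int) 0
      = (nums.drop (jn + 1)).foldl max (nums[jn]'hjn) := by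
    rw [PySem.List.pyGetD_natCast, pvSufArr_getD max nums _ hjn, List.getD_eq_getElem _ _ hjn]
  have hminD : PySem.List.pyGetD (pvSufArr min nums) ((jn : Nat) : Int) 0
      = (nums.drop (jn + 1)).foldl min (nums[jn]'hjn) := by
    rw [PySem.List.pyGetD_natCast, pvSufArr_getD min nums _ hjn, List.getD_eq_getElem _ _ hjn]
  rw [hmaxD, hminD, mul_comm c, mul_comm c]

-- ===== VERDICT (by name: the statement is the Claim_ definition above) =====
theorem maximumProduct_spec : Claim_equal_maximumProduct := by
  intro nums m _ hpre
  obtain ⟨hne, hm1, hmn⟩ := hpre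
  obtain ⟨x0, xs, rfl⟩ : ∃ x0 xs, nums = x0 :: xs := by
    cases nums with
    | nil => exact absurd rfl hne
    | cons x0 xs => exact ⟨x0, xs, rfl⟩
  show maximumProduct (x0 :: xs) m = maximumProduct_alt (x0 :: xs) m
  -- A-side: the loop is the option-max fold of the fixed-last-position candidate list
  have hloop := pvLoop x0 xs m hm1 (x0 :: xs).length 0 (by omega) none
  have hz : m - 1 + ((0 : Nat) : Int) = m - 1 := by push_cast; ring
  rw [hz] at hloop
  simp only [List.take_zero, List.foldl_nil] at hloop
  have hA : maximumProduct (x0 :: xs) m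
      = (((PySem.List.pyRange (m - 1) (((x0 :: xs).length : Nat) : Int) 1).flatMap (fun i =>
          (PySem.List.pyRange 0 (i - m + 2) 1).map (fun k =>
            PySem.List.pyGetD (x0 :: xs) k 0 * PySem.List.pyGetD (x0 :: xs) i 0))).foldl
          pvOptStep none).getD 0 := by
    simp only [maximumProduct, List.headD_cons]
    rw [pvFoldl_flatMap]
    exact congrArg (Option.getD · 0) hloop
  -- B-side: the arrays are the suffix-extrema arrays, the scan the fixed-first-position fold
  have hB : maximumProduct_alt (x0 :: xs) m
      = (((PySem.List.pyRange 0 (((x0 :: xs).length : Int)- m + 1) 1).flatMap (fun k =>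
          (PySem.List.pyRange (k + m - 1) (((x0 :: xs).length : Nat) : Int) 1).map (fun i =>
            PySem.List.pyGetD (x0 :: xs) k 0 * PySem.List.pyGetD (x0 :: xs) i 0))).foldl
          pvOptStep none).getD 0 := by
    simp only [maximumProduct_alt, PySem.List.slice_none_none]
    rw [pvPairSplit (x0 :: xs)]
    rw [pvSufLoopFull max max_assoc (x0 :: xs) hne, pvSufLoopFull min min_assoc (x0 :: xs) hne]
    rw [← pvOptFold_getD, pvFoldl_flatMap, List.foldl_map]
    congr 1
    apply PySem.List.foldl_congr_mem
    intro r k hk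
    have hk' := (PySem.List.mem_pyRange_one).1 hk
    exact (pvChunkK (x0 :: xs) m hm1 k hk'.1 hk'.2 r).symm
  rw [hA, hB]
  exact congrArg (Option.getD · 0)
    (pvOptFold_eq_of_mem _ _ (fun x => pvMemTranspose (x0 :: xs) m x))
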